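-- pv_equiv track=rewrite | github.com/borzoian40/Python-For-Everyone-Horstmann | Chapter 6/P6.06.py | sumWithoutSmallest
-- ===== SOURCE A (Python) =====
-- def sumWithoutSmallest(lst):
--     if len(lst) == 0:
--         return 0
--
--     total_sum = lst[0]
--     smallest = lst[0]
--
--     for num in lst[1:]:
--         total_sum += num
--
--         if num < smallest:
--             smallest = num
--
--     return total_sum - smallest
-- ===== SOURCE B (Python) =====
-- def sumWithoutSmallest(lst):
--     return sum(sorted(lst)[1:])
-- ===== Notes on version B (the rewrite author's own statement) =====
-- stated objective: simpler
-- what changed: Instead of accumulating a running total and tracking the minimum in one loop, B sorts the list and sums the slice after the first (smallest) element: sum(sorted(lst)[1:]); the empty-list guard disappears since the slice is then empty.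
import Mathlib
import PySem

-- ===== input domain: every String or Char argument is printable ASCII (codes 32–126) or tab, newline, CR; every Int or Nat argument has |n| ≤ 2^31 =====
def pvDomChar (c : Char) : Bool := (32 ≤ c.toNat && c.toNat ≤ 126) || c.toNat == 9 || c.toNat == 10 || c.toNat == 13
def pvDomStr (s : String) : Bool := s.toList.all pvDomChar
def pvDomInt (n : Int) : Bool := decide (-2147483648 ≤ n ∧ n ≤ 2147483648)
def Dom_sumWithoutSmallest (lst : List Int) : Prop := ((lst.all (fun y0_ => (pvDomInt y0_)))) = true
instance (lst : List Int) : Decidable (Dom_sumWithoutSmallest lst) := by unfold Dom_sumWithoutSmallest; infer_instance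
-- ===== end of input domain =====

-- B replaces A's fused loop (running total + running minimum, then subtract) by a
-- sort-then-drop algorithm: sum(sorted(lst)[1:]); simpler, no empty-list guard needed.

-- ===== PORT A =====
-- A: guard on empty; seed total and smallest with lst[0]; loop over lst[1:] updating both.
def sumWithoutSmallest (lst : List Int) : Int :=
  match lst with
  | [] => 0
  | x :: rest =>
    let st := rest.foldl
      (fun (acc : Int × Int) num =>
        (acc.1 + num, if num < acc.2 then num else acc.2))
      (x, x)
    st.1 - st.2

-- ===== PORT B =====
-- B: sum(sorted(lst)[1:])
def sumWithoutSmallest_alt (lst : List Int) : Int :=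
  (PySem.List.slice (PySem.List.sorted lst (fun x => x) false) (some 1) none).sum

-- ===== PRECONDITION & SPEC =====
def Spec_sumWithoutSmallest (lst : List Int) (out : Int) : Prop := out = sumWithoutSmallest_alt lst
instance (lst : List Int) (out : Int) : Decidable (Spec_sumWithoutSmallest lst out) := by unfold Spec_sumWithoutSmallest; infer_instance

-- ===== CLAIM (what is proved, stated in full; the proofs are below) =====
def Claim_equal_sumWithoutSmallest : Prop := ∀ (lst : List Int), Dom_sumWithoutSmallest lst → Spec_sumWithoutSmallest lst (sumWithoutSmallest lst)

-- ===== LEMMAS AND PROOFS =====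

-- A's fused fold computes (x + sum rest, foldl min x rest).
theorem pv_fold_pair (rest : List Int) (t s : Int) :
    rest.foldl
      (fun (acc : Int × Int) num =>
        (acc.1 + num, if num < acc.2 then num else acc.2))
      (t, s) = (t + rest.sum, rest.foldl min s) := by
  induction rest generalizing t s with
  | nil => simp
  | cons a l ih =>
    simp only [List.foldl_cons, List.sum_cons, ih]
    have h1 : t + a + l.sum = t + (a + l.sum) := by ring
    have h2 : (if a < s then a else s) = min s a := by
      rw [min_def]; split_ifs <;> omega
    rw [h1, h2]

theorem pv_foldl_min_mem (rest : List Int) (s : Int) : rest.foldl min s ∈ s :: rest := by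
  induction rest generalizing s with
  | nil => simp
  | cons a l ih =>
    rw [List.foldl_cons]
    rcases List.mem_cons.mp (ih (min s a)) with h | h
    · rw [h]
      rcases min_choice s a with hc | hc <;> rw [hc]
      · exact List.mem_cons_self
      · exact List.mem_cons_of_mem _ List.mem_cons_self
    · exact List.mem_cons_of_mem _ (List.mem_cons_of_mem _ h)

theorem pv_foldl_min_le (rest : List Int) (s : Int) :
    ∀ y ∈ s :: rest, rest.foldl min s ≤ y := by
  induction rest generalizing s with
  | nil => intro y hy; simp at hy; simp [hy]
  | cons a l ih =>
    intro y hy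
    have h := ih (min s a)
    rcases List.mem_cons.mp hy with h1 | h1
    · calc l.foldl min (min s a) ≤ min s a := h _ (List.mem_cons_self)
        _ ≤ s := min_le_left _ _
        _ = y := h1.symm
    · rcases List.mem_cons.mp h1 with h2 | h2
      · calc l.foldl min (min s a) ≤ min s a := h _ (List.mem_cons_self)
          _ ≤ a := min_le_right _ _
          _ = y := h2.symm
      · exact h _ (List.mem_cons_of_mem _ h2)

-- ===== VERDICT (by name: the statement is the Claim_ definition above) =====
theorem sumWithoutSmallest_spec : Claim_equal_sumWithoutSmallest := by
  intro lst _
  unfold Spec_sumWithoutSmallest sumWithoutSmallest sumWithoutSmallest_alt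
  rw [PySem.List.slice_from_one]
  cases lst with
  | nil => simp [PySem.List.sorted]
  | cons x rest =>
    simp only [pv_fold_pair]
    -- sorted is nonempty
    obtain ⟨m, t, hmt⟩ : ∃ m t, PySem.List.sorted (x :: rest) (fun y => y) false = m :: t := by
      cases h : PySem.List.sorted (x :: rest) (fun y => y) false with
      | nil => exact absurd ((PySem.List.sorted_eq_nil_iff _ _ _).mp h) (by simp)
      | cons m t => exact ⟨m, t, rfl⟩
    have hperm := PySem.List.sorted_perm (x :: rest) (fun y => y) false
    rw [hmt] at hperm
    have hsum : m + t.sum = x + rest.sum := by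
      have := hperm.sum_eq; simpa using this
    have hm_le : ∀ y ∈ x :: rest, m ≤ y :=
      PySem.List.key_head_sorted_le (xs := x :: rest) (key := fun y => y) hmt
    have hmin_mem : rest.foldl min x ∈ x :: rest := pv_foldl_min_mem rest x
    have hm_mem : m ∈ x :: rest := hperm.mem_iff.mp List.mem_cons_self
    have heq : rest.foldl min x = m :=
      le_antisymm (pv_foldl_min_le rest x m hm_mem) (hm_le _ hmin_mem)
    rw [hmt, List.tail_cons, heq]
    omega
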